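-- pv_equiv track=rewrite | github.com/RideMatch1/qubic-church | apps/web/scripts/fibonacci_investigation.py | fibonacci_spiral_positions
-- ===== SOURCE A (Python) =====
-- center = (64, 64)
--
-- def fibonacci_spiral_positions(n_points, start=center):
--     """Generiere Positionen entlang einer Fibonacci-Spirale."""
--     positions = []
--     r, c = start
--
--     # Fibonacci-Abstände
--     fib_steps = [1, 1, 2, 3, 5, 8, 13, 21, 34, 55, 89]
--
--     # Richtungen: rechts, runter, links, hoch
--     directions = [(0, 1), (1, 0), (0, -1), (-1, 0)]
--     dir_idx = 0
--
--     for step in fib_steps: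
--         dr, dc = directions[dir_idx % 4]
--         for _ in range(step):
--             if 0 <= r < 128 and 0 <= c < 128:
--                 positions.append((r, c))
--             r += dr
--             c += dc
--         dir_idx += 1
--
--     return positions[:n_points]
-- ===== SOURCE B (Python) =====
-- center = (64, 64)
--
-- def fibonacci_spiral_positions(n_points, start=center):
--     """Fibonacci-Spirale per Segment: jede gerade Strecke wird arithmetisch auf das
--     Gitter geclippt (Intervallschnitt) statt Zelle fuer Zelle geprueft."""
--     fib_steps = [1, 1, 2, 3, 5, 8, 13, 21, 34, 55, 89]
--     out = []
--     r, c = start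
--     for i, L in enumerate(fib_steps):
--         axis = i % 4
--         if axis == 0:      # right: row r, cols c .. c+L-1
--             if 0 <= r < 128:
--                 out.extend((r, cc) for cc in range(max(c, 0), min(c + L - 1, 127) + 1))
--             c += L
--         elif axis == 1:    # down: col c, rows r .. r+L-1
--             if 0 <= c < 128:
--                 out.extend((rr, c) for rr in range(max(r, 0), min(r + L - 1, 127) + 1))
--             r += L
--         elif axis == 2:    # left: row r, cols c down to c-L+1
--             if 0 <= r < 128:
--                 out.extend((r, cc) for cc in range(min(c, 127), max(c - L + 1, 0) - 1, -1))
--             c -= L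
--         else:              # up: col c, rows r down to r-L+1
--             if 0 <= c < 128:
--                 out.extend((rr, c) for rr in range(min(r, 127), max(r - L + 1, 0) - 1, -1))
--             r -= L
--     return out[:n_points]
-- ===== Notes on version B (the rewrite author's own statement) =====
-- stated objective: alternative
-- what changed: Replaces A's per-cell walk (check-append-advance for each of the 232 cells) by per-segment interval clipping: each of the 11 straight segments is intersected with the 128x128 grid arithmetically (max/min bounds) and emitted as one range, with no per-cell bounds test.
import Mathlib
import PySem

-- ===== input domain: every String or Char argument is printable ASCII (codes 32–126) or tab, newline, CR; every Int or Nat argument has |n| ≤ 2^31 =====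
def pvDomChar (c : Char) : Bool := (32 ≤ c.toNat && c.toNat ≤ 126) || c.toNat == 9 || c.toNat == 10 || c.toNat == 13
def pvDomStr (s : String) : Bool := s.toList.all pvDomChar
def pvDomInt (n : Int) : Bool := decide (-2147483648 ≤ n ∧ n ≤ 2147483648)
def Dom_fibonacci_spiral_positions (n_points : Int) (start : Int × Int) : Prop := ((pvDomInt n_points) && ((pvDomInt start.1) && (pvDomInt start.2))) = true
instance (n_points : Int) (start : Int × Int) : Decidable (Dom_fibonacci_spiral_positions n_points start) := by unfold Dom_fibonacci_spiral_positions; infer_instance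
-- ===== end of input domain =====

-- B replaces A's per-cell check-append-advance walk by per-segment interval clipping:
-- each straight segment is intersected with the grid arithmetically and emitted as one range
-- (objective: alternative algorithm, no per-cell bounds test).

-- shared module data
def pvFibSteps : List Int := [1, 1, 2, 3, 5, 8, 13, 21, 34, 55, 89]
def pvDirections : List (Int × Int) := [(0, 1), (1, 0), (0, -1), (-1, 0)]
-- directions[i % 4]: the index is always in range (0..3), so the IndexError default never fires
def pvDir (i : Int) : Int × Int := (PySem.List.pyGet? pvDirections (PySem.Int.mod i 4)).getD (0, 0)

-- ===== PORT A =====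
-- inner 'for _ in range(step)' loop of A
def pvAInner : Nat → List (Int × Int) × Int × Int → Int × Int → List (Int × Int) × Int × Int
  | 0, st, _ => st
  | k + 1, (pos, r, c), (dr, dc) =>
      pvAInner k ((if 0 ≤ r ∧ r < 128 ∧ 0 ≤ c ∧ c < 128 then pos ++ [(r, c)] else pos),
                  r + dr, c + dc) (dr, dc)

-- outer 'for step in fib_steps' loop of A
def pvAOuter : List Int → List (Int × Int) × Int × Int × Int → List (Int × Int) × Int × Int × Int
  | [], st => st
  | step :: rest, (pos, r, c, dirIdx) =>
      let st' := pvAInner step.toNat (pos, r, c) (pvDir dirIdx)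
      pvAOuter rest (st'.1, st'.2.1, st'.2.2, dirIdx + 1)

def fibonacci_spiral_positions (n_points : Int) (start : Int × Int) : List (Int × Int) :=
  PySem.List.slice (pvAOuter pvFibSteps ([], start.1, start.2, 0)).1 none (some n_points)

-- ===== PORT B =====
-- the 'for i, L in enumerate(fib_steps)' loop of Source B: clip each segment, advance by a whole segment
def pvBLoop : List (Int × Int) → List (Int × Int) × Int × Int → List (Int × Int) × Int × Int
  | [], st => st
  | (i, L) :: rest, (out, r, c) =>
      let axis := PySem.Int.mod i 4
      if axis = 0 then
        pvBLoop rest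
          ((if 0 ≤ r ∧ r < 128 then
              out ++ (PySem.List.pyRange (max c 0) (min (c + L - 1) 127 + 1) 1).map (fun cc => (r, cc))
            else out), r, c + L)
      else if axis = 1 then
        pvBLoop rest
          ((if 0 ≤ c ∧ c < 128 then
              out ++ (PySem.List.pyRange (max r 0) (min (r + L - 1) 127 + 1) 1).map (fun rr => (rr, c))
            else out), r + L, c)
      else if axis = 2 then
        pvBLoop rest
          ((if 0 ≤ r ∧ r < 128 then
              out ++ (PySem.List.pyRange (min c 127) (max (c - L + 1) 0 - 1) (-1)).map (fun cc => (r, cc))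
            else out), r, c - L)
      else
        pvBLoop rest
          ((if 0 ≤ c ∧ c < 128 then
              out ++ (PySem.List.pyRange (min r 127) (max (r - L + 1) 0 - 1) (-1)).map (fun rr => (rr, c))
            else out), r - L, c)

def fibonacci_spiral_positions_alt (n_points : Int) (start : Int × Int) : List (Int × Int) :=
  PySem.List.slice (pvBLoop (PySem.List.enumerate pvFibSteps 0) ([], start.1, start.2)).1
    none (some n_points)

-- ===== PRECONDITION & SPEC =====
def Spec_fibonacci_spiral_positions (n_points : Int) (start : Int × Int) (out : List (Int × Int)) : Prop := out = fibonacci_spiral_positions_alt n_points start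
instance (n_points : Int) (start : Int × Int) (out : List (Int × Int)) : Decidable (Spec_fibonacci_spiral_positions n_points start out) := by unfold Spec_fibonacci_spiral_positions; infer_instance

-- ===== CLAIM (what is proved, stated in full; the proofs are below) =====
def Claim_equal_fibonacci_spiral_positions : Prop := ∀ (n_points : Int) (start : Int × Int), Dom_fibonacci_spiral_positions n_points start → Spec_fibonacci_spiral_positions n_points start (fibonacci_spiral_positions n_points start)

-- ===== LEMMAS AND PROOFS =====

def pvInGrid (p : Int × Int) : Bool := decide (0 ≤ p.1 ∧ p.1 < 128 ∧ 0 ≤ p.2 ∧ p.2 < 128)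

-- A's double loop, re-expressed over a flat list of unit deltas
def pvG : List (Int × Int) → List (Int × Int) × Int × Int → List (Int × Int) × Int × Int
  | [], st => st
  | d :: ds, (pos, r, c) =>
      pvG ds ((if 0 ≤ r ∧ r < 128 ∧ 0 ≤ c ∧ c < 128 then pos ++ [(r, c)] else pos),
              r + d.1, c + d.2)

-- the pre-move points, one per delta
def pvPrefix : Int × Int → List (Int × Int) → List (Int × Int)
  | _, [] => []
  | p, d :: ds => p :: pvPrefix (p.1 + d.1, p.2 + d.2) ds

-- the flat delta list A effectively walks
def pvFlat : List Int → Int → List (Int × Int)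
  | [], _ => []
  | s :: rest, i => List.replicate s.toNat (pvDir i) ++ pvFlat rest (i + 1)

lemma pvAInner_eq_g (k : Nat) : ∀ (st : List (Int × Int) × Int × Int) (d : Int × Int),
    pvAInner k st d = pvG (List.replicate k d) st := by
  induction k with
  | zero => intro st d; rfl
  | succ k ih =>
    rintro ⟨pos, r, c⟩ ⟨dr, dc⟩
    simp [pvAInner, pvG, List.replicate_succ, ih]

lemma pvG_append (xs ys : List (Int × Int)) : ∀ st, pvG (xs ++ ys) st = pvG ys (pvG xs st) := by
  induction xs with
  | nil => intro st; rfl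
  | cons d xs ih => rintro ⟨pos, r, c⟩; simp [pvG, ih]

lemma pvAOuter_eq_g : ∀ (fibs : List Int) (i : Int) (pos : List (Int × Int)) (r c : Int),
    pvAOuter fibs (pos, r, c, i)
      = ((pvG (pvFlat fibs i) (pos, r, c)).1, (pvG (pvFlat fibs i) (pos, r, c)).2.1,
         (pvG (pvFlat fibs i) (pos, r, c)).2.2, i + fibs.length) := by
  intro fibs
  induction fibs with
  | nil => intro i pos r c; simp [pvAOuter, pvFlat, pvG]
  | cons s rest ih =>
    intro i pos r c
    simp only [pvAOuter, pvFlat, pvG_append, pvAInner_eq_g, ih, List.length_cons]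
    have h4 : i + 1 + (rest.length : Int) = i + ((rest.length : Int) + 1) := by ring
    rw [h4]
    push_cast
    rfl

lemma pvG_spec : ∀ (ds : List (Int × Int)) (pos : List (Int × Int)) (r c : Int),
    (pvG ds (pos, r, c)).1 = pos ++ (pvPrefix (r, c) ds).filter pvInGrid := by
  intro ds
  induction ds with
  | nil => intro pos r c; simp [pvG, pvPrefix]
  | cons d ds ih =>
    intro pos r c
    by_cases h : 0 ≤ r ∧ r < 128 ∧ 0 ≤ c ∧ c < 128
    · simp [pvG, pvPrefix, ih, h, pvInGrid]
    · simp [pvG, pvPrefix, ih, h, pvInGrid]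

-- the endpoint of a delta walk
def pvEnd (p : Int × Int) (ds : List (Int × Int)) : Int × Int :=
  ds.foldl (fun q d => (q.1 + d.1, q.2 + d.2)) p

lemma pvEnd_replicate (k : Nat) : ∀ (p : Int × Int) (d : Int × Int),
    pvEnd p (List.replicate k d) = (p.1 + k * d.1, p.2 + k * d.2) := by
  induction k with
  | zero => intro p d; simp [pvEnd]
  | succ k ih =>
    intro p d
    simp only [List.replicate_succ, pvEnd, List.foldl_cons] at *
    rw [ih]
    push_cast
    exact Prod.ext (by ring) (by ring)

lemma pvPrefix_append (xs : List (Int × Int)) : ∀ (ys : List (Int × Int)) (p : Int × Int),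
    pvPrefix p (xs ++ ys) = pvPrefix p xs ++ pvPrefix (pvEnd p xs) ys := by
  induction xs with
  | nil => intro ys p; simp [pvPrefix, pvEnd]
  | cons d xs ih => intro ys p; simp [pvPrefix, pvEnd, ih, List.foldl_cons]

-- prefix points of a straight segment, as a range, one lemma per direction
lemma pvPrefix_right (k : Nat) : ∀ (r c : Int),
    pvPrefix (r, c) (List.replicate k (0, 1))
      = (PySem.List.pyRange c (c + k) 1).map (fun cc => (r, cc)) := by
  induction k with
  | zero => intro r c; simp [pvPrefix, PySem.List.pyRange_one_eq_nil]
  | succ k ih =>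
    intro r c
    have hb : c + ((k:Int) + 1) = (c + 1) + k := by ring
    rw [List.replicate_succ]
    show (r, c) :: pvPrefix (r + 0, c + 1) (List.replicate k (0, 1)) = _
    push_cast
    rw [hb, PySem.List.pyRange_one_cons (by omega), List.map_cons]
    simp only [add_zero]
    rw [ih]

lemma pvPrefix_down (k : Nat) : ∀ (r c : Int),
    pvPrefix (r, c) (List.replicate k (1, 0))
      = (PySem.List.pyRange r (r + k) 1).map (fun rr => (rr, c)) := by
  induction k with
  | zero => intro r c; simp [pvPrefix, PySem.List.pyRange_one_eq_nil]
  | succ k ih =>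
    intro r c
    have hb : r + ((k:Int) + 1) = (r + 1) + k := by ring
    rw [List.replicate_succ]
    show (r, c) :: pvPrefix (r + 1, c + 0) (List.replicate k (1, 0)) = _
    push_cast
    rw [hb, PySem.List.pyRange_one_cons (by omega), List.map_cons]
    simp only [add_zero]
    rw [ih]

lemma pvPrefix_left (k : Nat) : ∀ (r c : Int),
    pvPrefix (r, c) (List.replicate k (0, -1))
      = (PySem.List.pyRange c (c - k) (-1)).map (fun cc => (r, cc)) := by
  induction k with
  | zero => intro r c; simp [pvPrefix, PySem.List.pyRange_neg_one_eq_nil]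
  | succ k ih =>
    intro r c
    have hb : c - ((k:Int) + 1) = (c + -1) - k := by ring
    have hc : c + -1 = c - 1 := by ring
    rw [List.replicate_succ]
    show (r, c) :: pvPrefix (r + 0, c + -1) (List.replicate k (0, -1)) = _
    push_cast
    rw [hb, PySem.List.pyRange_neg_one_cons (by omega), List.map_cons]
    simp only [add_zero]
    rw [ih, hc]

lemma pvPrefix_up (k : Nat) : ∀ (r c : Int),
    pvPrefix (r, c) (List.replicate k (-1, 0))
      = (PySem.List.pyRange r (r - k) (-1)).map (fun rr => (rr, c)) := by
  induction k with
  | zero => intro r c; simp [pvPrefix, PySem.List.pyRange_neg_one_eq_nil]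
  | succ k ih =>
    intro r c
    have hb : r - ((k:Int) + 1) = (r + -1) - k := by ring
    have hc : r + -1 = r - 1 := by ring
    rw [List.replicate_succ]
    show (r, c) :: pvPrefix (r + -1, c + 0) (List.replicate k (-1, 0)) = _
    push_cast
    rw [hb, PySem.List.pyRange_neg_one_cons (by omega), List.map_cons]
    simp only [add_zero]
    rw [ih, hc]

-- clip an ascending range by an interval
lemma pvClipAux (lo hi : Int) : ∀ (n : Nat) (a b : Int), (b - a).toNat ≤ n →
    (PySem.List.pyRange a b 1).filter (fun x => decide (lo ≤ x ∧ x < hi))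
      = PySem.List.pyRange (max a lo) (min b hi) 1 := by
  intro n
  induction n with
  | zero =>
    intro a b h
    rw [PySem.List.pyRange_one_eq_nil (by omega), PySem.List.pyRange_one_eq_nil (by omega)]
    rfl
  | succ n ih =>
    intro a b h
    by_cases hab : a < b
    · rw [PySem.List.pyRange_one_cons hab]
      by_cases hlo : lo ≤ a
      · by_cases hhi : a < hi
        · rw [List.filter_cons_of_pos (by simp [hlo, hhi]),
              ih (a + 1) b (by omega),
              PySem.List.pyRange_one_cons (show max a lo < min b hi by omega)]
          congr 2 <;> omega
        · rw [PySem.List.pyRange_one_eq_nil (show min b hi ≤ max a lo by omega)]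
          rw [List.filter_cons_of_neg (by simp; omega)]
          rw [List.filter_eq_nil_iff.2]
          intro x hx
          have := PySem.List.mem_pyRange_one.1 hx
          simp
          omega
      · rw [List.filter_cons_of_neg (by simp; omega), ih (a + 1) b (by omega)]
        congr 1 <;> omega
    · rw [PySem.List.pyRange_one_eq_nil (by omega), PySem.List.pyRange_one_eq_nil (by omega)]
      rfl

lemma pvClipA (lo hi a b : Int) :
    (PySem.List.pyRange a b 1).filter (fun x => decide (lo ≤ x ∧ x < hi))
      = PySem.List.pyRange (max a lo) (min b hi) 1 :=
  pvClipAux lo hi (b - a).toNat a b le_rfl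

-- clip a descending range by an interval
lemma pvClipDesc (lo hi a b : Int) :
    (PySem.List.pyRange a b (-1)).filter (fun x => decide (lo ≤ x ∧ x < hi))
      = PySem.List.pyRange (min a (hi - 1)) (max b (lo - 1)) (-1) := by
  rw [PySem.List.pyRange_neg_one_eq_reverse, List.filter_reverse, pvClipA,
      PySem.List.pyRange_neg_one_eq_reverse]
  congr 2 <;> omega

-- filtering a segment's prefix points = B's clipped range, per direction
lemma pvSeg_right (k : Nat) (r c : Int) :
    (pvPrefix (r, c) (List.replicate k (0, 1))).filter pvInGrid
      = if 0 ≤ r ∧ r < 128 then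
          (PySem.List.pyRange (max c 0) (min (c + k - 1) 127 + 1) 1).map (fun cc => (r, cc))
        else [] := by
  rw [pvPrefix_right, List.filter_map]
  by_cases hr : 0 ≤ r ∧ r < 128
  · rw [if_pos hr]
    have hpred : pvInGrid ∘ (fun cc => (r, cc)) = fun x => decide ((0:Int) ≤ x ∧ x < 128) := by
      funext x; simp [pvInGrid, hr.1, hr.2]
    rw [hpred, pvClipA]
    congr 2 <;> omega
  · rw [if_neg hr]
    have : ((PySem.List.pyRange c (c + k) 1).filter (pvInGrid ∘ (fun cc => (r, cc)))) = [] := by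
      apply List.filter_eq_nil_iff.2
      intro x _
      simp [pvInGrid]
      omega
    rw [this, List.map_nil]

lemma pvSeg_down (k : Nat) (r c : Int) :
    (pvPrefix (r, c) (List.replicate k (1, 0))).filter pvInGrid
      = if 0 ≤ c ∧ c < 128 then
          (PySem.List.pyRange (max r 0) (min (r + k - 1) 127 + 1) 1).map (fun rr => (rr, c))
        else [] := by
  rw [pvPrefix_down, List.filter_map]
  by_cases hc : 0 ≤ c ∧ c < 128
  · rw [if_pos hc]
    have hpred : pvInGrid ∘ (fun rr => (rr, c)) = fun x => decide ((0:Int) ≤ x ∧ x < 128) := by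
      funext x; simp [pvInGrid, hc.1, hc.2]
    rw [hpred, pvClipA]
    congr 2 <;> omega
  · rw [if_neg hc]
    have : ((PySem.List.pyRange r (r + k) 1).filter (pvInGrid ∘ (fun rr => (rr, c)))) = [] := by
      apply List.filter_eq_nil_iff.2
      intro x _
      simp [pvInGrid]
      omega
    rw [this, List.map_nil]

lemma pvSeg_left (k : Nat) (r c : Int) :
    (pvPrefix (r, c) (List.replicate k (0, -1))).filter pvInGrid
      = if 0 ≤ r ∧ r < 128 then
          (PySem.List.pyRange (min c 127) (max (c - k + 1) 0 - 1) (-1)).map (fun cc => (r, cc))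
        else [] := by
  rw [pvPrefix_left, List.filter_map]
  by_cases hr : 0 ≤ r ∧ r < 128
  · rw [if_pos hr]
    have hpred : pvInGrid ∘ (fun cc => (r, cc)) = fun x => decide ((0:Int) ≤ x ∧ x < 128) := by
      funext x; simp [pvInGrid, hr.1, hr.2]
    rw [hpred, pvClipDesc]
    congr 2 <;> omega
  · rw [if_neg hr]
    have : ((PySem.List.pyRange c (c - k) (-1)).filter (pvInGrid ∘ (fun cc => (r, cc)))) = [] := by
      apply List.filter_eq_nil_iff.2
      intro x _
      simp [pvInGrid]
      omega
    rw [this, List.map_nil]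

lemma pvSeg_up (k : Nat) (r c : Int) :
    (pvPrefix (r, c) (List.replicate k (-1, 0))).filter pvInGrid
      = if 0 ≤ c ∧ c < 128 then
          (PySem.List.pyRange (min r 127) (max (r - k + 1) 0 - 1) (-1)).map (fun rr => (rr, c))
        else [] := by
  rw [pvPrefix_up, List.filter_map]
  by_cases hc : 0 ≤ c ∧ c < 128
  · rw [if_pos hc]
    have hpred : pvInGrid ∘ (fun rr => (rr, c)) = fun x => decide ((0:Int) ≤ x ∧ x < 128) := by
      funext x; simp [pvInGrid, hc.1, hc.2]
    rw [hpred, pvClipDesc]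
    congr 2 <;> omega
  · rw [if_neg hc]
    have : ((PySem.List.pyRange r (r - k) (-1)).filter (pvInGrid ∘ (fun rr => (rr, c)))) = [] := by
      apply List.filter_eq_nil_iff.2
      intro x _
      simp [pvInGrid]
      omega
    rw [this, List.map_nil]

lemma pvEnd_append (xs ys : List (Int × Int)) (p : Int × Int) :
    pvEnd p (xs ++ ys) = pvEnd (pvEnd p xs) ys := by
  simp [pvEnd, List.foldl_append]

lemma pvIf_out {P : Prop} [Decidable P] (out X : List (Int × Int)) :
    (if P then out ++ X else out) = out ++ (if P then X else []) := by
  split_ifs <;> simp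

-- each residue of the direction index names its direction
lemma pvDir_mod_eq (i : Int) : pvDir i = pvDir (PySem.Int.mod i 4) := by
  simp [pvDir, PySem.Int.mod]

-- the main loop correspondence: B's segment loop = A's filtered prefix walk
lemma pvBLoop_eq : ∀ (fibs : List Int) (i : Int) (out : List (Int × Int)) (r c : Int),
    (∀ L ∈ fibs, 0 ≤ L) →
    pvBLoop (PySem.List.enumerate fibs i) (out, r, c)
      = (out ++ (pvPrefix (r, c) (pvFlat fibs i)).filter pvInGrid,
         pvEnd (r, c) (pvFlat fibs i)) := by
  intro fibs
  induction fibs with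
  | nil => intro i out r c _; simp [PySem.List.enumerate, pvBLoop, pvFlat, pvPrefix, pvEnd]
  | cons L rest ih =>
    intro i out r c hpos
    have hL : 0 ≤ L := hpos L (by simp)
    have hrest : ∀ L' ∈ rest, 0 ≤ L' := fun L' h => hpos L' (by simp [h])
    have hLt : ((L.toNat : Int)) = L := Int.toNat_of_nonneg hL
    have henum : PySem.List.enumerate (L :: rest) i = (i, L) :: PySem.List.enumerate rest (i + 1) := by
      simp [PySem.List.enumerate]
    have hm0 : 0 ≤ PySem.Int.mod i 4 := PySem.Int.mod_nonneg i (by omega)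
    have hm4 : PySem.Int.mod i 4 < 4 := PySem.Int.mod_lt i (by omega)
    rw [henum]
    have hflat : pvFlat (L :: rest) i
        = List.replicate L.toNat (pvDir i) ++ pvFlat rest (i + 1) := rfl
    interval_cases h : (PySem.Int.mod i 4)
    · -- axis 0: right
      have hdir : pvDir i = (0, 1) := by rw [pvDir_mod_eq, h]; rfl
      show pvBLoop ((i, L) :: PySem.List.enumerate rest (i + 1)) (out, r, c) = _
      rw [pvBLoop]
      simp only [h, Int.reduceEq, reduceIte]
      rw [ih (i + 1) _ r (c + L) hrest, hflat, hdir,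
          pvPrefix_append, List.filter_append, pvSeg_right, pvEnd_append, pvEnd_replicate]
      simp only [mul_zero, mul_one, add_zero, hLt]
      rw [pvIf_out, List.append_assoc]
    · -- axis 1: down
      have hdir : pvDir i = (1, 0) := by rw [pvDir_mod_eq, h]; rfl
      show pvBLoop ((i, L) :: PySem.List.enumerate rest (i + 1)) (out, r, c) = _
      rw [pvBLoop]
      simp only [h, Int.reduceEq, reduceIte]
      rw [ih (i + 1) _ (r + L) c hrest, hflat, hdir,
          pvPrefix_append, List.filter_append, pvSeg_down, pvEnd_append, pvEnd_replicate]
      simp only [mul_zero, mul_one, add_zero, hLt]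
      rw [pvIf_out, List.append_assoc]
    · -- axis 2: left
      have hdir : pvDir i = (0, -1) := by rw [pvDir_mod_eq, h]; rfl
      show pvBLoop ((i, L) :: PySem.List.enumerate rest (i + 1)) (out, r, c) = _
      rw [pvBLoop]
      simp only [h, Int.reduceEq, reduceIte]
      rw [ih (i + 1) _ r (c - L) hrest, hflat, hdir,
          pvPrefix_append, List.filter_append, pvSeg_left, pvEnd_append, pvEnd_replicate]
      simp only [mul_zero, mul_neg_one, add_zero, hLt]
      rw [pvIf_out, List.append_assoc, show c + -L = c - L from by ring]
    · -- axis 3: up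
      have hdir : pvDir i = (-1, 0) := by rw [pvDir_mod_eq, h]; rfl
      show pvBLoop ((i, L) :: PySem.List.enumerate rest (i + 1)) (out, r, c) = _
      rw [pvBLoop]
      simp only [h, Int.reduceEq, reduceIte]
      rw [ih (i + 1) _ (r - L) c hrest, hflat, hdir,
          pvPrefix_append, List.filter_append, pvSeg_up, pvEnd_append, pvEnd_replicate]
      simp only [mul_zero, mul_neg_one, add_zero, hLt]
      rw [pvIf_out, List.append_assoc, show r + -L = r - L from by ring]

-- ===== VERDICT (by name: the statement is the Claim_ definition above) =====
set_option maxRecDepth 20000 in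
theorem fibonacci_spiral_positions_spec : Claim_equal_fibonacci_spiral_positions := by
  intro n_points start _
  unfold Spec_fibonacci_spiral_positions
  unfold fibonacci_spiral_positions fibonacci_spiral_positions_alt
  congr 1
  rw [pvAOuter_eq_g, pvG_spec, List.nil_append,
      pvBLoop_eq pvFibSteps 0 [] start.1 start.2 (by decide)]
  simp
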